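-- pv_equiv track=rewrite | github.com/Dennis-coder/AoC2021 | day17/main.py | calc_b
-- ===== SOURCE A (Python) =====
-- def sim(x_vel, y_vel, target):
--     x, y = 0, 0
--     while x < target[0][0] or y > target[1][1]:
--         x += x_vel
--         y += y_vel
--         if x_vel > 0:
--             x_vel -= 1
--         y_vel -= 1
--     if target[0][0] <= x and x <= target[0][1] and target[1][0] <= y and y <= target[1][1]:
--         return True
--     else:
--         return False
--
-- def calc_b(indata):
--     lowest_x = 0
--     while (lowest_x*(lowest_x+1)//2) < indata[0][0]:
--         lowest_x += 1
--     highest_x = indata[0][1]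
--     lowest_y = indata[1][0]
--     highest_y = abs(indata[1][0]) - 1 if indata[1][1] < 0 else indata[1][1] if indata[1][1] > 0 else None
--
--     vel = []
--     for x in range(lowest_x, highest_x + 1):
--         for y in range(lowest_y, highest_y + 1):
--             if sim(x, y, indata):
--                 vel.append([x,y])
--
--     return len(vel)
-- ===== SOURCE B (Python) =====
-- # Same count, different per-candidate test: instead of jointly simulating x and y
-- # until the probe passes the box corner, run the two phases decoupled (x-scan to the
-- # band's left edge, then y-scan to the band's top) and reconstruct the skipped
-- # coordinate by the closed-form triangular-number position.
--
-- def _hits(vx, vy, xmin, xmax, ymin, ymax):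
--     # phase 1: steps until the x coordinate reaches the band's left edge
--     t, x, dx = 0, 0, vx
--     while x < xmin:
--         x += dx
--         if dx > 0:
--             dx -= 1
--         t += 1
--     # y after t steps, closed form
--     y = t * vy - t * (t - 1) // 2
--     # phase 2: steps until the y coordinate drops to the band's top
--     while y > ymax:
--         y += vy - t
--         t += 1
--     # x after t steps, closed form
--     r = vx - t
--     x = vx * (vx + 1) // 2 - (r * (r + 1) // 2 if r > 0 else 0)
--     return xmin <= x <= xmax and ymin <= y <= ymax
--
-- def calc_b(indata):
--     xmin, xmax = indata[0][0], indata[0][1]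
--     ymin, ymax = indata[1][0], indata[1][1]
--     lo = 0
--     while lo * (lo + 1) // 2 < xmin:
--         lo += 1
--     hi_y = abs(ymin) - 1 if ymax < 0 else ymax
--     return sum(1 for vx in range(lo, xmax + 1)
--                  for vy in range(ymin, hi_y + 1)
--                  if _hits(vx, vy, xmin, xmax, ymin, ymax))
-- ===== Notes on version B (the rewrite author's own statement) =====
-- stated objective: alternative
-- what changed: Per candidate velocity, instead of jointly stepping (x,y,vx,vy) until the probe passes the box corner, B runs two decoupled per-axis scans (x-scan to the band's left edge, then y-scan to the band's top, with the step counter shared) and reconstructs the other coordinate at each hand-over by the closed-form triangular-number position; the count is kept as an integer instead of a materialised list.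
-- crash fix: On inputs whose x-candidate range is nonempty and indata[1][1] == 0, A raises TypeError (highest_y is None and None+1 fails); B treats the top y-bound as 0 and returns the count. — e.g. on calc_b([[1, 2], [-2, 0]]): A raises TypeError, B returns 6
import Mathlib
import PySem

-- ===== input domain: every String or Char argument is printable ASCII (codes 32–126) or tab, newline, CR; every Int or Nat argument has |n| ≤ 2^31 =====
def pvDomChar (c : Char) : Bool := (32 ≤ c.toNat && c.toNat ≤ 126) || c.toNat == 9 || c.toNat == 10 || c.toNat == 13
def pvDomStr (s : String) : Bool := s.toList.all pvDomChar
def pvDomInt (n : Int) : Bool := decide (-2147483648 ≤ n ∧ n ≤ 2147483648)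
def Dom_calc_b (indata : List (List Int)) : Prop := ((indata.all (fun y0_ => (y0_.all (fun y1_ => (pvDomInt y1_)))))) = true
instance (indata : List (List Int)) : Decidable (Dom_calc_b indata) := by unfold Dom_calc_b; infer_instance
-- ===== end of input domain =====

-- B replaces the joint per-candidate (x,y) simulation by two decoupled per-axis scans with
-- closed-form triangular-number reconstruction of the skipped coordinate (objective: alternative).

-- ===== PORT A =====
-- fuel guard only (both while-loops terminate on every input Pre_ admits); generous upper bound
def pvFuel (xv yv ymax : Int) : Nat := xv.toNat + 2 * yv.natAbs + 2 * ymax.natAbs + 8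

-- 'while (lowest_x*(lowest_x+1)//2) < indata[0][0]: lowest_x += 1'
def pvLxLoop (fuel : Nat) (lx xmin : Int) : Int :=
  if PySem.Int.floordiv (lx * (lx + 1)) 2 < xmin then
    match fuel with
    | 0 => lx
    | f + 1 => pvLxLoop f (lx + 1) xmin
  else lx

-- literal port of 'sim' (condition checked first, then one joint step; final box test)
def pvSim (fuel : Nat) (x y xvel yvel xmin xmax ymin ymax : Int) : Bool :=
  if x < xmin ∨ y > ymax then
    match fuel with
    | 0 => false
    | f + 1 =>
        pvSim f (x + xvel) (y + yvel) (if xvel > 0 then xvel - 1 else xvel) (yvel - 1)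
          xmin xmax ymin ymax
  else decide (xmin ≤ x ∧ x ≤ xmax ∧ ymin ≤ y ∧ y ≤ ymax)

def calc_b (indata : List (List Int)) : Int :=
  let row0 := PySem.List.pyGetD indata 0 []
  let row1 := PySem.List.pyGetD indata 1 []
  let xmin := PySem.List.pyGetD row0 0 0
  let lowest_x := pvLxLoop (xmin.toNat + 1) 0 xmin
  let highest_x := PySem.List.pyGetD row0 1 0
  let lowest_y := PySem.List.pyGetD row1 0 0
  let ymax := PySem.List.pyGetD row1 1 0
  -- Python: highest_y is None when ymax = 0 (then 'None + 1' raises TypeError — outside Pre_)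
  let highest_y := if ymax < 0 then |lowest_y| - 1 else ymax
  let vel := (PySem.List.pyRange lowest_x (highest_x + 1) 1).foldl (fun acc x =>
      (PySem.List.pyRange lowest_y (highest_y + 1) 1).foldl (fun acc2 y =>
        if pvSim (pvFuel x y ymax) 0 0 x y xmin highest_x lowest_y ymax then
          acc2 ++ [[x, y]]
        else acc2) acc) ([] : List (List Int))
  (vel.length : Int)

-- ===== PORT B =====
def pvLoLoop (fuel : Nat) (lo xmin : Int) : Int :=
  if PySem.Int.floordiv (lo * (lo + 1)) 2 < xmin then
    match fuel with
    | 0 => lo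
    | f + 1 => pvLoLoop f (lo + 1) xmin
  else lo

-- phase 1: x-scan to the band's left edge (returns the unconsumed fuel, x, dx, t)
def pvPhase1 (fuel : Nat) (x dx t xmin : Int) : Option (Nat × Int × Int × Int) :=
  if x < xmin then
    match fuel with
    | 0 => none
    | f + 1 => pvPhase1 f (x + dx) (if dx > 0 then dx - 1 else dx) (t + 1) xmin
  else some (fuel, x, dx, t)

-- phase 2: y-scan to the band's top
def pvPhase2 (fuel : Nat) (y t vy ymax : Int) : Option (Int × Int) :=
  if y > ymax then
    match fuel with
    | 0 => none
    | f + 1 => pvPhase2 f (y + (vy - t)) (t + 1) vy ymax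
  else some (y, t)

def pvHits (fuel : Nat) (vx vy xmin xmax ymin ymax : Int) : Bool :=
  match pvPhase1 fuel 0 vx 0 xmin with
  | none => false
  | some (f, _, _, t1) =>
    let y0 := t1 * vy - PySem.Int.floordiv (t1 * (t1 - 1)) 2
    match pvPhase2 f y0 t1 vy ymax with
    | none => false
    | some (y, t) =>
      let r := vx - t
      let xf := PySem.Int.floordiv (vx * (vx + 1)) 2 -
        (if r > 0 then PySem.Int.floordiv (r * (r + 1)) 2 else 0)
      decide (xmin ≤ xf ∧ xf ≤ xmax ∧ ymin ≤ y ∧ y ≤ ymax)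

def calc_b_alt (indata : List (List Int)) : Int :=
  let row0 := PySem.List.pyGetD indata 0 []
  let row1 := PySem.List.pyGetD indata 1 []
  let xmin := PySem.List.pyGetD row0 0 0
  let xmax := PySem.List.pyGetD row0 1 0
  let ymin := PySem.List.pyGetD row1 0 0
  let ymax := PySem.List.pyGetD row1 1 0
  let lo := pvLoLoop (xmin.toNat + 1) 0 xmin
  let hiY := if ymax < 0 then |ymin| - 1 else ymax
  (PySem.List.pyRange lo (xmax + 1) 1).foldl (fun c vx =>
    (PySem.List.pyRange ymin (hiY + 1) 1).foldl (fun c2 vy =>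
      if pvHits (pvFuel vx vy ymax) vx vy xmin xmax ymin ymax then c2 + 1 else c2) c) 0

-- ===== PRECONDITION & SPEC =====
-- Pre_ excludes exactly the inputs where Python A raises: IndexError when indata has fewer
-- than 2 rows or a row has fewer than 2 entries, and TypeError ('None + 1') when
-- indata[1][1] = 0 and the vx-loop body is reached (some 0 ≤ k ≤ xmax has k(k+1)/2 ≥ xmin).
def Pre_calc_b (indata : List (List Int)) : Prop :=
  2 ≤ indata.length ∧ 2 ≤ (indata.getD 0 []).length ∧ 2 ≤ (indata.getD 1 []).length ∧
  ((indata.getD 1 []).getD 1 0 ≠ 0 ∨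
    ∀ k ∈ Finset.range (((indata.getD 0 []).getD 1 0).toNat + 1),
      ¬((k : Int) ≤ (indata.getD 0 []).getD 1 0 ∧
        (indata.getD 0 []).getD 0 0 ≤ (k : Int) * ((k : Int) + 1) / 2))
instance (indata : List (List Int)) : Decidable (Pre_calc_b indata) := by
  unfold Pre_calc_b; infer_instance

def pvWitness_calc_b : List (List Int) := [[20, 30], [-10, -5]]

-- On inputs whose x-candidate range is nonempty and indata[1][1] == 0, A raises TypeError
-- (highest_y is None and 'None + 1' fails); B treats the top y-bound as 0 and returns the count.
def Raises_calc_b (indata : List (List Int)) : Prop :=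
  2 ≤ indata.length ∧ 2 ≤ (indata.getD 0 []).length ∧ 2 ≤ (indata.getD 1 []).length ∧
  (indata.getD 1 []).getD 1 0 = 0 ∧
  ∃ k ∈ Finset.range (((indata.getD 0 []).getD 1 0).toNat + 1),
    (k : Int) ≤ (indata.getD 0 []).getD 1 0 ∧
    (indata.getD 0 []).getD 0 0 ≤ (k : Int) * ((k : Int) + 1) / 2
instance (indata : List (List Int)) : Decidable (Raises_calc_b indata) := by
  unfold Raises_calc_b; infer_instance

def pvRaiseWitness_calc_b : List (List Int) := [[1, 2], [-2, 0]]
def pvRaiseWitnessOut_calc_b : Int := 6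

def Spec_calc_b (indata : List (List Int)) (out : Int) : Prop := out = calc_b_alt indata
instance (indata : List (List Int)) (out : Int) : Decidable (Spec_calc_b indata out) := by
  unfold Spec_calc_b; infer_instance

-- ===== CLAIM (what is proved, stated in full; the proofs are below) =====
def Claim_equal_calc_b : Prop :=
  ∀ (indata : List (List Int)), Dom_calc_b indata → Pre_calc_b indata →
    Spec_calc_b indata (calc_b indata)
def Claim_raises_calc_b : Prop :=
  (∀ (indata : List (List Int)), Dom_calc_b indata → Raises_calc_b indata → ¬ Pre_calc_b indata) ∧
  (Dom_calc_b (pvRaiseWitness_calc_b) ∧ Raises_calc_b (pvRaiseWitness_calc_b) ∧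
    calc_b_alt (pvRaiseWitness_calc_b) = pvRaiseWitnessOut_calc_b)

-- ===== LEMMAS AND PROOFS =====
-- closed-form trajectory
def pvTri (n : Int) : Int := n * (n + 1) / 2
def pvXAt (vx t : Int) : Int := pvTri vx - pvTri (max (vx - t) 0)
def pvDxAt (vx t : Int) : Int := max (vx - t) 0
def pvYAt (vy t : Int) : Int := t * vy - pvTri (t - 1)

theorem pv_two_tri (n : Int) : 2 * pvTri n = n * (n + 1) := by
  obtain ⟨k, hk⟩ := Int.even_mul_succ_self n
  unfold pvTri; omega

theorem pv_tri_succ (n : Int) : pvTri n = pvTri (n - 1) + n := by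
  have h1 := pv_two_tri n
  have h2 : 2 * pvTri (n - 1) = (n - 1) * n := by
    rw [pv_two_tri]; ring_nf
  have h3 : n * (n + 1) = (n - 1) * n + 2 * n := by ring
  omega

theorem pv_floordiv_two (m : Int) : PySem.Int.floordiv m 2 = m / 2 :=
  PySem.Int.floordiv_eq_ediv_of_pos (by norm_num)

theorem pv_dx_nonneg (vx t : Int) : 0 ≤ pvDxAt vx t := le_max_right _ _

theorem pv_xAt_succ (vx t : Int) : pvXAt vx (t + 1) = pvXAt vx t + pvDxAt vx t := by
  unfold pvXAt pvDxAt
  rcases le_or_gt (vx - t) 0 with h | h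
  · rw [max_eq_right h, max_eq_right (by omega : vx - (t + 1) ≤ 0)]; ring
  · rw [max_eq_left (by omega : (0:Int) ≤ vx - t), max_eq_left (by omega : (0:Int) ≤ vx - (t+1)),
      show vx - (t + 1) = (vx - t) - 1 by ring]
    have := pv_tri_succ (vx - t); omega

theorem pv_dxAt_succ (vx t : Int) :
    pvDxAt vx (t + 1) = if pvDxAt vx t > 0 then pvDxAt vx t - 1 else pvDxAt vx t := by
  unfold pvDxAt
  rcases le_or_gt (vx - t) 0 with h | h
  · rw [max_eq_right h, max_eq_right (by omega : vx - (t + 1) ≤ 0)]; simp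
  · rw [max_eq_left (by omega : (0:Int) ≤ vx - t), max_eq_left (by omega : (0:Int) ≤ vx - (t+1))]
    simp only [if_pos h]; ring

theorem pv_yAt_succ (vy t : Int) : pvYAt vy (t + 1) = pvYAt vy t + (vy - t) := by
  unfold pvYAt
  have h1 : (t + 1) * vy = t * vy + vy := by ring
  have h2 := pv_tri_succ t
  have h3 : t + 1 - 1 = t := by ring
  rw [h3]; omega

theorem pv_y0_formula (vy t : Int) :
    t * vy - PySem.Int.floordiv (t * (t - 1)) 2 = pvYAt vy t := by
  rw [pv_floordiv_two]
  unfold pvYAt pvTri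
  have h : t * (t - 1) = (t - 1) * (t - 1 + 1) := by ring
  rw [h]

theorem pv_xf_formula (vx t : Int) :
    PySem.Int.floordiv (vx * (vx + 1)) 2 -
      (if vx - t > 0 then PySem.Int.floordiv ((vx - t) * ((vx - t) + 1)) 2 else 0) =
    pvXAt vx t := by
  unfold pvXAt pvTri
  rw [pv_floordiv_two]
  rcases le_or_gt (vx - t) 0 with h | h
  · rw [if_neg (by omega), max_eq_right h]; norm_num
  · rw [if_pos h, max_eq_left (by omega : (0:Int) ≤ vx - t), pv_floordiv_two]

theorem pv_phase2_eq (xmin xmax ymin ymax vx vy : Int) (f : Nat) :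
    ∀ (t y : Int), xmin ≤ pvXAt vx t →
      pvSim f (pvXAt vx t) y (pvDxAt vx t) (vy - t) xmin xmax ymin ymax =
        (match pvPhase2 f y t vy ymax with
         | none => false
         | some (y2, t2) =>
             decide (xmin ≤ pvXAt vx t2 ∧ pvXAt vx t2 ≤ xmax ∧ ymin ≤ y2 ∧ y2 ≤ ymax)) := by
  induction f with
  | zero =>
    intro t y hx
    rw [pvSim, pvPhase2]
    by_cases hy : y > ymax
    · rw [if_pos (Or.inr hy), if_pos hy]
    · rw [if_neg (by omega), if_neg hy]
  | succ f ih =>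
    intro t y hx
    rw [pvSim, pvPhase2]
    by_cases hy : y > ymax
    · rw [if_pos (Or.inr hy), if_pos hy]
      have hx' : xmin ≤ pvXAt vx (t + 1) := by
        rw [pv_xAt_succ]; have := pv_dx_nonneg vx t; omega
      have hstep := ih (t + 1) (y + (vy - t)) hx'
      rw [pv_xAt_succ, pv_dxAt_succ] at hstep
      have hv : vy - t - 1 = vy - (t + 1) := by ring
      rw [hv]
      exact hstep
    · rw [if_neg (by omega), if_neg hy]

theorem pv_phase1_eq (xmin xmax ymin ymax vx vy : Int) (f : Nat) :
    ∀ (t : Int),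
      pvSim f (pvXAt vx t) (pvYAt vy t) (pvDxAt vx t) (vy - t) xmin xmax ymin ymax =
        (match pvPhase1 f (pvXAt vx t) (pvDxAt vx t) t xmin with
         | none => false
         | some (f', _, _, t1) =>
             match pvPhase2 f' (pvYAt vy t1) t1 vy ymax with
             | none => false
             | some (y2, t2) =>
                 decide (xmin ≤ pvXAt vx t2 ∧ pvXAt vx t2 ≤ xmax ∧ ymin ≤ y2 ∧ y2 ≤ ymax)) := by
  induction f with
  | zero =>
    intro t
    rw [pvPhase1]
    by_cases hx : pvXAt vx t < xmin
    · rw [if_pos hx, pvSim, if_pos (Or.inl hx)]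
    · rw [if_neg hx]
      exact pv_phase2_eq xmin xmax ymin ymax vx vy 0 t (pvYAt vy t) (by omega)
  | succ f ih =>
    intro t
    rw [pvPhase1]
    by_cases hx : pvXAt vx t < xmin
    · rw [if_pos hx, pvSim, if_pos (Or.inl hx)]
      have hstep := ih (t + 1)
      rw [pv_xAt_succ, pv_dxAt_succ, pv_yAt_succ] at hstep
      have hv : vy - t - 1 = vy - (t + 1) := by ring
      rw [hv]
      exact hstep
    · rw [if_neg hx]
      exact pv_phase2_eq xmin xmax ymin ymax vx vy (f + 1) t (pvYAt vy t) (by omega)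

theorem pv_hits_eq (fuel : Nat) (vx vy xmin xmax ymin ymax : Int) (hvx : 0 ≤ vx) :
    pvSim fuel 0 0 vx vy xmin xmax ymin ymax = pvHits fuel vx vy xmin xmax ymin ymax := by
  have h0x : pvXAt vx 0 = 0 := by
    unfold pvXAt; rw [show vx - 0 = vx by ring, max_eq_left hvx]; ring
  have h0d : pvDxAt vx 0 = vx := by
    unfold pvDxAt; rw [show vx - 0 = vx by ring, max_eq_left hvx]
  have h0y : pvYAt vy 0 = 0 := by unfold pvYAt pvTri; norm_num
  have h := pv_phase1_eq xmin xmax ymin ymax vx vy fuel 0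
  rw [h0x, h0d, h0y, show vy - 0 = vy by ring] at h
  rw [h]
  unfold pvHits
  cases h1 : pvPhase1 fuel 0 vx 0 xmin with
  | none => rfl
  | some q =>
    obtain ⟨f', x1, dx1, t1⟩ := q
    simp only [pv_y0_formula]
    cases h2 : pvPhase2 f' (pvYAt vy t1) t1 vy ymax with
    | none => rfl
    | some p =>
      obtain ⟨y2, t2⟩ := p
      simp only [pv_xf_formula]

theorem pv_lx_eq : ∀ (f : Nat) (lx xmin : Int), pvLxLoop f lx xmin = pvLoLoop f lx xmin := by
  intro f
  induction f with
  | zero => intro lx xmin; rw [pvLxLoop, pvLoLoop]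
  | succ f ih => intro lx xmin; rw [pvLxLoop, pvLoLoop]; split_ifs with h <;> simp [ih]

theorem pv_lx_ge : ∀ (f : Nat) (lx xmin : Int), lx ≤ pvLxLoop f lx xmin := by
  intro f
  induction f with
  | zero => intro lx xmin; rw [pvLxLoop]; split_ifs <;> omega
  | succ f ih =>
    intro lx xmin
    rw [pvLxLoop]
    split_ifs with h
    · have := ih (lx + 1) xmin; omega
    · omega

-- append-accumulator length = integer counter, pointwise-equal predicates
theorem pv_count_inner (g : Int → List Int) (p q : Int → Bool)
    (h : ∀ y, p y = q y) :
    ∀ (ys : List Int) (acc : List (List Int)) (c : Int), c = acc.length →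
      ((ys.foldl (fun a y => if p y then a ++ [g y] else a) acc).length : Int) =
        ys.foldl (fun c2 y => if q y then c2 + 1 else c2) c := by
  intro ys
  induction ys with
  | nil => intro acc c hc; simp [hc]
  | cons y ys ih =>
    intro acc c hc
    simp only [List.foldl_cons, h y]
    by_cases hq : q y = true
    · rw [if_pos hq, if_pos hq]
      exact ih (acc ++ [g y]) (c + 1) (by simp [hc])
    · rw [if_neg hq, if_neg hq]
      exact ih acc c hc

theorem pv_count_outer (P Q : Int → Int → Bool) (ys : List Int) :
    ∀ (xs : List Int), (∀ x ∈ xs, ∀ y, P x y = Q x y) →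
      ∀ (acc : List (List Int)) (c : Int), c = acc.length →
      ((xs.foldl (fun a x => ys.foldl (fun a2 y => if P x y then a2 ++ [[x, y]] else a2) a)
          acc).length : Int) =
        xs.foldl (fun c2 x => ys.foldl (fun c3 y => if Q x y then c3 + 1 else c3) c2) c := by
  intro xs
  induction xs with
  | nil => intro _ acc c hc; simp [hc]
  | cons x xs ih =>
    intro h acc c hc
    simp only [List.foldl_cons]
    exact ih (fun x' hx' => h x' (List.mem_cons_of_mem _ hx'))
      (ys.foldl (fun a2 y => if P x y then a2 ++ [[x, y]] else a2) acc)
      (ys.foldl (fun c3 y => if Q x y then c3 + 1 else c3) c)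
      ((pv_count_inner (fun y => [x, y]) (P x) (Q x) (h x (by simp)) ys acc c hc).symm)

-- ===== VERDICT (by name: the statement is the Claim_ definition above) =====
theorem calc_b_spec : Claim_equal_calc_b := by
  intro indata _ _
  unfold Spec_calc_b calc_b calc_b_alt
  dsimp only
  rw [pv_lx_eq]
  apply pv_count_outer
  intro x hx y
  apply pv_hits_eq
  have h1 := PySem.List.mem_pyRange_one.mp hx
  have h2 := pv_lx_ge ((PySem.List.pyGetD (PySem.List.pyGetD indata 0 []) 0 0).toNat + 1) 0
    (PySem.List.pyGetD (PySem.List.pyGetD indata 0 []) 0 0)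
  rw [pv_lx_eq] at h2
  omega
  simp

theorem calc_b_raises : Claim_raises_calc_b := by
  unfold Claim_raises_calc_b
  constructor
  · intro indata _ hr hp
    obtain ⟨_, _, _, h0, k, hk, hle, htr⟩ := hr
    rcases hp.2.2.2 with h | h
    · exact h h0
    · exact h k hk ⟨hle, htr⟩
  · refine ⟨by decide, by decide, by decide⟩

-- self-check that the crash-fix claim was indeed established (also its only in-file consumer)
theorem pv_crash_fix_recorded_ok : Claim_raises_calc_b ∧ pvRaiseWitnessOut_calc_b = 6 :=
  ⟨calc_b_raises, rfl⟩
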